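-- pv_equiv track=rewrite | github.com/NateLeeP/Rolling-Stones-Project | rs_scrape_song.py | lyric_words_count
-- ===== SOURCE A (Python) =====
-- def lyric_words_count(lyrics):
--     word_count_dict = {}
--     for line in lyrics:
--         for word in line.replace(',','').split(' '):
--             if word.lower().strip('.') in word_count_dict.keys():
--                 word_count_dict[word.lower().strip('.')] += 1
--             else:
--                 word_count_dict[word.lower().strip('.')] = 1
--     return sorted(word_count_dict.items(), key = lambda x:x[1], reverse = True)
-- ===== SOURCE B (Python) =====
-- def lyric_words_count(lyrics):
--     tokens = [w.lower().strip('.')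
--               for line in lyrics
--               for w in line.replace(',', '').split(' ')]
--     counts = {}
--     for t in tokens:
--         counts[t] = counts.get(t, 0) + 1
--     # no sort call: keep the result list in descending count order by inserting
--     # each (word, count) after every entry with a count >= its own (stable ties)
--     result = []
--     for item in counts.items():
--         i = 0
--         while i < len(result) and result[i][1] >= item[1]:
--             i += 1
--         result.insert(i, item)
--     return result
-- ===== Notes on version B (the rewrite author's own statement) =====
-- stated objective: alternative
-- what changed: Drops the builtin sort entirely: B flattens the lyrics into one token list, counts with a single flat get-based pass, and builds the output by inserting each (word,count) into a list kept in descending-count order (stable insertion sort), instead of A's nested membership-test counting loop followed by sorted(..., reverse=True).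
import Mathlib
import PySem

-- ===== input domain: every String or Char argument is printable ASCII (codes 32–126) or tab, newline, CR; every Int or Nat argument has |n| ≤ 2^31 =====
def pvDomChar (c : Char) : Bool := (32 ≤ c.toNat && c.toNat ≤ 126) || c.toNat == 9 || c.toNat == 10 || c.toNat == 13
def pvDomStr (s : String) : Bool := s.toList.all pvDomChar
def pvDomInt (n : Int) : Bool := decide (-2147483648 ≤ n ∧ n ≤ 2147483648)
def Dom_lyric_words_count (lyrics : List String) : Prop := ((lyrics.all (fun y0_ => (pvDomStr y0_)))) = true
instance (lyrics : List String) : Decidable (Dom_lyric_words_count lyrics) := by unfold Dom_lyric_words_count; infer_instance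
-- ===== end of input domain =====

-- B drops the builtin sort: it counts tokens in one flat pass and builds the output by
-- inserting each (word, count) into a list kept in descending-count order (objective: alternative).

-- word.lower().strip('.') — A's Python recomputes it at each use, so port A applies it where A does
def pvTok (w : String) : String := PySem.Str.stripChars (PySem.Str.lower w) "."

-- line.replace(',','').split(' ')  (sep ' ' is nonempty, split? returns some)
def pvWords (line : String) : List String :=
  (PySem.Str.split? (PySem.Str.replace line "," "") " ").getD []

-- ===== PORT A =====
def lyric_words_count (lyrics : List String) : List (String × Int) :=
  PySem.List.sorted
    (lyrics.foldl (fun d line =>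
      (pvWords line).foldl (fun d word =>
        if d.contains (pvTok word) then d.insert (pvTok word) (d.getD (pvTok word) 0 + 1)
        else d.insert (pvTok word) 1) d)
      (PySem.Dict.empty : PySem.Dict String Int)).items
    (fun x => x.2) true

-- ===== PORT B =====
-- the flattened comprehension of normalized tokens
def pvTokens (lyrics : List String) : List String :=
  lyrics.flatMap (fun line => (pvWords line).map pvTok)

-- the while loop: skip entries whose count is >= item's, insert item there
def pvInsertDesc (item : String × Int) (res : List (String × Int)) : List (String × Int) :=
  match res with
  | [] => [item]
  | y :: ys => if y.2 ≥ item.2 then y :: pvInsertDesc item ys else item :: y :: ys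

def lyric_words_count_alt (lyrics : List String) : List (String × Int) :=
  (((pvTokens lyrics).foldl (fun d t => d.insert t (d.getD t 0 + 1))
      (PySem.Dict.empty : PySem.Dict String Int)).items).foldl
    (fun res item => pvInsertDesc item res) []

-- ===== PRECONDITION & SPEC =====
def Spec_lyric_words_count (lyrics : List String) (out : List (String × Int)) : Prop := out = lyric_words_count_alt lyrics
instance (lyrics : List String) (out : List (String × Int)) : Decidable (Spec_lyric_words_count lyrics out) := by unfold Spec_lyric_words_count; infer_instance

-- ===== CLAIM (what is proved, stated in full; the proofs are below) =====
def Claim_equal_lyric_words_count : Prop := ∀ (lyrics : List String), Dom_lyric_words_count lyrics → Spec_lyric_words_count lyrics (lyric_words_count lyrics)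

-- ===== LEMMAS AND PROOFS =====

-- a missing key reads as 0 through getD
theorem pv_getD_of_not_contains (d : PySem.Dict String Int) (k : String)
    (h : d.contains k = false) : d.getD k 0 = 0 := by
  simp [PySem.Dict.getD, PySem.Dict.get?, PySem.Dict.contains] at *
  rw [List.find?_eq_none.mpr]
  · rfl
  · rintro ⟨a, b⟩ hp
    simpa using h a b hp

-- both branches of A's if are B's get-based step
theorem pv_body_eq_counter_step (d : PySem.Dict String Int) (k : String) :
    (if d.contains k then d.insert k (d.getD k 0 + 1) else d.insert k 1) =
      d.insert k (d.getD k 0 + 1) := by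
  by_cases h : d.contains k
  · simp [h]
  · simp only [Bool.not_eq_true] at h
    simp [h, pv_getD_of_not_contains d k h]

theorem pv_inner_fold (ws : List String) (d : PySem.Dict String Int) :
    ws.foldl (fun d word =>
        if d.contains (pvTok word) then d.insert (pvTok word) (d.getD (pvTok word) 0 + 1)
        else d.insert (pvTok word) 1) d =
      (ws.map pvTok).foldl (fun d x => d.insert x (d.getD x 0 + 1)) d := by
  induction ws generalizing d with
  | nil => simp
  | cons w ws ih =>
    simp only [List.foldl_cons, List.map_cons]
    rw [pv_body_eq_counter_step]
    exact ih _

-- A's nested counting loop builds the same dict as B's flat pass over the token list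
theorem pv_nested_fold (lyrics : List String) (d : PySem.Dict String Int) :
    lyrics.foldl (fun d line =>
      (pvWords line).foldl (fun d word =>
        if d.contains (pvTok word) then d.insert (pvTok word) (d.getD (pvTok word) 0 + 1)
        else d.insert (pvTok word) 1) d) d =
    (pvTokens lyrics).foldl (fun d x => d.insert x (d.getD x 0 + 1)) d := by
  induction lyrics generalizing d with
  | nil => simp [pvTokens]
  | cons l ls ih =>
    simp only [List.foldl_cons, pvTokens, List.flatMap_cons, List.foldl_append]
    rw [pv_inner_fold]
    exact ih _

-- B's while-loop insertion is insertBy with the strict-descending test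
theorem pv_insertDesc_eq_insertBy (item : String × Int) (res : List (String × Int)) :
    pvInsertDesc item res =
      PySem.List.insertBy (fun a b => decide (b.2 < a.2)) item res := by
  induction res with
  | nil => simp [pvInsertDesc, PySem.List.insertBy]
  | cons y ys ih =>
    simp only [pvInsertDesc, PySem.List.insertBy]
    by_cases h : y.2 ≥ item.2
    · simp [h, not_lt.mpr h, ih]
    · simp [h, lt_of_not_ge h]

-- ===== VERDICT (by name: the statement is the Claim_ definition above) =====
theorem lyric_words_count_spec : Claim_equal_lyric_words_count := by
  intro lyrics _
  unfold Spec_lyric_words_count lyric_words_count lyric_words_count_alt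
  rw [pv_nested_fold]
  rw [PySem.List.sorted_rev_eq_foldl_insertBy]
  have hf : (fun res item => pvInsertDesc item res) =
      (fun acc x => PySem.List.insertBy (fun a b => decide (b.2 < a.2)) x acc) := by
    funext acc item
    exact pv_insertDesc_eq_insertBy item acc
  rw [hf]
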